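-- pv_equiv track=rewrite | github.com/abingeorge07/EC551_ProgrammingAssignments | ProgrammingAssignment1/PrimeImplicants.py | simplify_prime_implicants
-- ===== SOURCE A (Python) =====
-- def bit_diff_count(a, b):
--     """Count the number of differing bits between two binary strings."""
--     return sum([av != bv for av, bv in zip(a, b)])
--
-- def simplify_prime_implicants(prime_implicants):
--     changes = True
--     prev_implicants = prime_implicants.copy()
--
--     while changes:
--         changes = False
--         new_implicants = set()
--         marked = set()
--
--         for pi1 in prev_implicants:
--             for pi2 in prev_implicants:
--                 if pi1 != pi2 and bit_diff_count(pi1, pi2) == 1: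
--                     changes = True
--                     new_pi = ''.join(['-' if a != b else a for a, b in zip(pi1, pi2)])
--                     new_implicants.add(new_pi)
--                     marked.add(pi1)
--                     marked.add(pi2)
--
--         for pi in prev_implicants:
--             if pi not in marked:
--                 new_implicants.add(pi)
--
--         prev_implicants = new_implicants
--
--     return prev_implicants
-- ===== SOURCE B (Python) =====
-- def _merge(a, b):
--     """Combine a and b if they differ in exactly one position of their
--     overlap: that position becomes '-', the rest is kept unchanged.
--     Return None when they differ in zero or in more than one position."""
--     out = []
--     seen_diff = False
--     for x, y in zip(a, b):
--         if x == y: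
--             out.append(x)
--         elif seen_diff:
--             return None
--         else:
--             seen_diff = True
--             out.append('-')
--     return ''.join(out) if seen_diff else None
--
--
-- def simplify_prime_implicants(prime_implicants):
--     implicants = list(prime_implicants)
--     merged = {}          # dict used as an insertion-ordered set
--     paired = set()
--     for i, a in enumerate(implicants):
--         for b in implicants[i + 1:]:
--             m = _merge(a, b)
--             if m is not None:
--                 merged.setdefault(m)
--                 paired.add(a)
--                 paired.add(b)
--     if not merged:
--         return set(implicants)
--     for s in implicants:
--         if s not in paired:
--             merged.setdefault(s)
--     return simplify_prime_implicants(list(merged))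
-- ===== Notes on version B (the rewrite author's own statement) =====
-- stated objective: faster
-- what changed: Each round visits every unordered pair exactly once (for i,a in enumerate: for b in implicants[i+1:]) and decides merge-or-not with a single early-exit pass that builds the combined implicant on the fly, instead of A's scan over all ordered pairs that first counts differing bits over the whole zip and then rebuilds the merge with a second zip pass; B's fixpoint is a tail recursion where A's is a while-loop with a changes flag.
import Mathlib
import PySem

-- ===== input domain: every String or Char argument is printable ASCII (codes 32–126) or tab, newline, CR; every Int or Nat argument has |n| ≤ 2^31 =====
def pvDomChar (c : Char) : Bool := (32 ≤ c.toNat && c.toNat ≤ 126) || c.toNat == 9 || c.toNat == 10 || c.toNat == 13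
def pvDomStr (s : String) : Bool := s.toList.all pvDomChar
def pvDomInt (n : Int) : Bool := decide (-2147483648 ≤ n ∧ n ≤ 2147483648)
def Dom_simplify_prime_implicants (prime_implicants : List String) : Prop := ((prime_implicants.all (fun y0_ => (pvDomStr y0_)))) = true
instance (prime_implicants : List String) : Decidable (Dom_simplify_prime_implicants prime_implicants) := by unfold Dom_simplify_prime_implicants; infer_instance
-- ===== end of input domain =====

-- B visits every unordered pair once (i < j) and decides merge-or-not in a single early-exit
-- pass that builds the combined implicant on the fly, instead of A's full ordered-pair scan
-- that first counts differing bits and then rebuilds the merge with a second zip pass; B's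
-- fixpoint is recursive where A's is a while-loop.
-- Both programs return a Python set; the ports carry it as a PySem.Set (distinct elements in
-- first-insertion order) and the proof shows the two ports produce the same list.
-- The loops/recursion are ported with a fuel bound (pvFuel, a generous upper bound on the
-- number of rounds); the fuel is a totality guard only and both ports consume the same bound.

-- ===== PORT A =====
-- bit_diff_count(a, b): sum([av != bv for av, bv in zip(a, b)])
def pvBitDiff (a b : List Char) : Int :=
  ((a.zip b).map (fun p => if p.1 ≠ p.2 then (1:Int) else 0)).sum

-- ''.join(['-' if a != b else a for a, b in zip(pi1, pi2)])
def pvMerge (a b : List Char) : List Char :=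
  (a.zip b).map (fun p => if p.1 ≠ p.2 then '-' else p.1)

-- fuel for the 'while' loop / B's recursion: an upper bound on the number of rounds
def pvFuel (l : List (List Char)) : Nat :=
  (l.foldl (fun a s => a + 2 ^ (s.length + 1)) 2) ^
    (2 * l.foldl (fun a s => max a s.length) 0 + 1) + 1

-- the body of A's nested 'for pi1/pi2' scan; state = (changes, new_implicants, marked)
def pvVisitA (st : Bool × PySem.Set (List Char) × PySem.Set (List Char))
    (pi1 pi2 : List Char) : Bool × PySem.Set (List Char) × PySem.Set (List Char) :=
  if pi1 ≠ pi2 ∧ pvBitDiff pi1 pi2 = 1 then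
    (true, PySem.Set.add st.2.1 (pvMerge pi1 pi2),
           PySem.Set.add (PySem.Set.add st.2.2 pi1) pi2)
  else st

def pvStA (prev : List (List Char)) :
    Bool × PySem.Set (List Char) × PySem.Set (List Char) :=
  prev.foldl (fun st pi1 =>
    prev.foldl (fun st pi2 => pvVisitA st pi1 pi2) st)
    (false, PySem.Set.empty, PySem.Set.empty)

-- one iteration of A's while-loop body: returns (changes, new_implicants)
def pvRoundA (prev : List (List Char)) : Bool × PySem.Set (List Char) :=
  let st := pvStA prev
  let newi := prev.foldl (fun n pi => if pi ∉ st.2.2 then PySem.Set.add n pi else n) st.2.1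
  (st.1, newi)

def pvLoopA : Nat → List (List Char) → List (List Char)
  | 0, prev => prev
  | Nat.succ f, prev =>
    let r := pvRoundA prev
    if r.1 then pvLoopA f r.2 else r.2

def simplify_prime_implicants (prime_implicants : List String) : List String :=
  (pvLoopA (pvFuel (prime_implicants.map String.toList))
    (prime_implicants.map String.toList)).map (fun cs => String.ofList cs)

-- ===== PORT B =====
-- _merge(a, b): one pass over zip(a, b) tracking whether a difference was seen
def pvMergeScan : List (Char × Char) → List Char → Bool → Option (List Char)
  | [], out, seen => if seen then some out else none
  | p :: zs, out, seen =>
    if p.1 = p.2 then pvMergeScan zs (out ++ [p.1]) seen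
    else if seen then none
    else pvMergeScan zs (out ++ ['-']) true

def pvMergeOne (a b : List Char) : Option (List Char) :=
  pvMergeScan (a.zip b) [] false

-- the body of B's inner loop; state = (merged, paired)
def pvVisitB (st : PySem.Set (List Char) × PySem.Set (List Char))
    (a b : List Char) : PySem.Set (List Char) × PySem.Set (List Char) :=
  match pvMergeOne a b with
  | some v => (PySem.Set.add st.1 v, PySem.Set.add (PySem.Set.add st.2 a) b)
  | none => st

-- 'for i, a in enumerate(implicants): for b in implicants[i+1:]' — implicants[i+1:] is the
-- suffix after a, so the two loops are the suffix recursion (same pairs, same order)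
def pvTriB : (PySem.Set (List Char) × PySem.Set (List Char)) → List (List Char) →
    (PySem.Set (List Char) × PySem.Set (List Char))
  | st, [] => st
  | st, a :: rest => pvTriB (rest.foldl (fun st b => pvVisitB st a b) st) rest

def pvLoopB : Nat → List (List Char) → List (List Char)
  | 0, impl => impl
  | Nat.succ f, impl =>
    let st := pvTriB (PySem.Set.empty, PySem.Set.empty) impl
    if st.1 = [] then PySem.Set.ofList impl
    else pvLoopB f (impl.foldl (fun n s => if s ∉ st.2 then PySem.Set.add n s else n) st.1)

def simplify_prime_implicants_alt (prime_implicants : List String) : List String :=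
  (pvLoopB (pvFuel (prime_implicants.map String.toList))
    (prime_implicants.map String.toList)).map (fun cs => String.ofList cs)

-- ===== PRECONDITION & SPEC =====
def Spec_simplify_prime_implicants (prime_implicants : List String) (out : List String) : Prop := out = simplify_prime_implicants_alt prime_implicants
instance (prime_implicants : List String) (out : List String) : Decidable (Spec_simplify_prime_implicants prime_implicants out) := by unfold Spec_simplify_prime_implicants; infer_instance

-- ===== CLAIM (what is proved, stated in full; the proofs are below) =====
def Claim_equal_simplify_prime_implicants : Prop := ∀ (prime_implicants : List String), Dom_simplify_prime_implicants prime_implicants → Spec_simplify_prime_implicants prime_implicants (simplify_prime_implicants prime_implicants)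

-- ===== LEMMAS AND PROOFS =====

-- mismatch counter over a zipped list, and the merge map
def pvCd (zs : List (Char × Char)) : Nat := zs.countP (fun p => decide (p.1 ≠ p.2))
def pvF (p : Char × Char) : Char := if p.1 ≠ p.2 then '-' else p.1

lemma pvBitDiff_eq_cd (a b : List Char) : pvBitDiff a b = (pvCd (a.zip b) : Int) := by
  unfold pvBitDiff pvCd
  induction (a.zip b) with
  | nil => simp
  | cons p zs ih =>
    simp only [List.map_cons, List.sum_cons, List.countP_cons, ih]
    by_cases h : p.1 = p.2
    · simp [h]
    · simp [h]
      ring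

lemma pvScan_true (zs : List (Char × Char)) : ∀ out,
    pvMergeScan zs out true = if pvCd zs = 0 then some (out ++ zs.map pvF) else none := by
  induction zs with
  | nil => intro out; simp [pvMergeScan, pvCd]
  | cons p t ih =>
    intro out
    by_cases h : p.1 = p.2
    · simp [pvMergeScan, h, ih, pvCd, pvF]
    · simp [pvMergeScan, h, pvCd]

lemma pvScan_false (zs : List (Char × Char)) : ∀ out,
    pvMergeScan zs out false = if pvCd zs = 1 then some (out ++ zs.map pvF) else none := by
  induction zs with
  | nil => intro out; simp [pvMergeScan, pvCd]
  | cons p t ih =>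
    intro out
    by_cases h : p.1 = p.2
    · simp [pvMergeScan, h, ih, pvCd, pvF]
    · simp [pvMergeScan, h, pvScan_true, pvCd, pvF]

lemma pvMergeOne_eq (a b : List Char) :
    pvMergeOne a b = if pvCd (a.zip b) = 1 then some (pvMerge a b) else none := by
  unfold pvMergeOne pvMerge
  rw [pvScan_false]
  rfl

lemma pvCd_zip_self (a : List Char) : pvCd (a.zip a) = 0 := by
  unfold pvCd
  induction a with
  | nil => simp
  | cons x t ih => rw [List.zip_cons_cons, List.countP_cons, ih]; simp

lemma pvGuard_iff (a b : List Char) :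
    (a ≠ b ∧ pvBitDiff a b = 1) ↔ pvCd (a.zip b) = 1 := by
  rw [pvBitDiff_eq_cd]
  constructor
  · rintro ⟨-, h⟩; exact_mod_cast h
  · intro h
    refine ⟨?_, by exact_mod_cast h⟩
    rintro rfl
    rw [pvCd_zip_self] at h
    exact one_ne_zero h.symm

lemma pvBitDiff_symm (a b : List Char) : pvBitDiff a b = pvBitDiff b a := by
  rw [pvBitDiff_eq_cd, pvBitDiff_eq_cd, pvCd, pvCd, ← List.zip_swap a b, List.countP_map]
  apply congrArg
  apply List.countP_congr
  intro p _
  rcases p with ⟨x, y⟩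
  by_cases h : x = y <;> simp [h, Ne, eq_comm]

lemma pvMerge_symm (a b : List Char) : pvMerge a b = pvMerge b a := by
  unfold pvMerge
  rw [← List.zip_swap a b, List.map_map]
  apply List.map_congr_left
  intro p _
  rcases p with ⟨x, y⟩
  by_cases h : x = y
  · subst h; simp
  · simp only [Function.comp_apply, Prod.swap_prod_mk]
    rw [if_pos h, if_pos (Ne.symm h)]

-- "this pair's effect is already in the state"
def pvCont (st : Bool × PySem.Set (List Char) × PySem.Set (List Char))
    (a b : List Char) : Prop :=
  (a ≠ b ∧ pvBitDiff a b = 1) →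
    (pvMerge a b ∈ st.2.1 ∧ a ∈ st.2.2 ∧ b ∈ st.2.2 ∧ st.1 = true)

lemma pvCont_refl (st : Bool × PySem.Set (List Char) × PySem.Set (List Char))
    (a b : List Char) (h : a = b) : pvCont st a b := by
  intro hg; exact absurd h hg.1

lemma pvCont_symm {st : Bool × PySem.Set (List Char) × PySem.Set (List Char)}
    {a b : List Char} (h : pvCont st a b) : pvCont st b a := by
  intro hg
  obtain ⟨h1, h2, h3, h4⟩ := h ⟨hg.1.symm, by rw [pvBitDiff_symm]; exact hg.2⟩
  exact ⟨by rw [pvMerge_symm]; exact h1, h3, h2, h4⟩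

lemma pvVisitA_of_cont {st : Bool × PySem.Set (List Char) × PySem.Set (List Char)}
    {a b : List Char} (h : pvCont st a b) : pvVisitA st a b = st := by
  unfold pvVisitA
  split_ifs with hg
  · obtain ⟨h1, h2, h3, h4⟩ := h hg
    obtain ⟨c, M, P⟩ := st
    simp only at h1 h2 h3 h4
    rw [PySem.Set.add_of_mem h1, PySem.Set.add_of_mem h2, PySem.Set.add_of_mem h3, h4]
  · rfl

lemma pvCont_visitA_mono {st : Bool × PySem.Set (List Char) × PySem.Set (List Char)}
    {a b : List Char} (h : pvCont st a b) (c d : List Char) :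
    pvCont (pvVisitA st c d) a b := by
  intro hg
  obtain ⟨h1, h2, h3, h4⟩ := h hg
  unfold pvVisitA
  split_ifs with hg'
  · exact ⟨(PySem.Set.mem_add _ _ _).mpr (Or.inl h1),
      (PySem.Set.mem_add _ _ _).mpr (Or.inl ((PySem.Set.mem_add _ _ _).mpr (Or.inl h2))),
      (PySem.Set.mem_add _ _ _).mpr (Or.inl ((PySem.Set.mem_add _ _ _).mpr (Or.inl h3))), rfl⟩
  · exact ⟨h1, h2, h3, h4⟩

lemma pvCont_visitA_self (st : Bool × PySem.Set (List Char) × PySem.Set (List Char))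
    (a b : List Char) : pvCont (pvVisitA st a b) a b := by
  intro hg
  unfold pvVisitA
  rw [if_pos hg]
  refine ⟨(PySem.Set.mem_add _ _ _).mpr ?_, ?_, (PySem.Set.mem_add _ _ _).mpr (Or.inr rfl), rfl⟩
  · exact Or.inr rfl
  · exact (PySem.Set.mem_add _ _ _).mpr (Or.inl ((PySem.Set.mem_add _ _ _).mpr (Or.inr rfl)))

lemma pvFold_noop {a : List Char} :
    ∀ (l : List (List Char)) (st : Bool × PySem.Set (List Char) × PySem.Set (List Char)),
    (∀ b ∈ l, pvCont st a b) →
    l.foldl (fun st b => pvVisitA st a b) st = st := by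
  intro l
  induction l with
  | nil => intro st _; rfl
  | cons b t ih =>
    intro st h
    simp only [List.foldl_cons]
    rw [pvVisitA_of_cont (h b (by simp))]
    exact ih st (fun x hx => h x (by simp [hx]))

lemma pvCont_fold_mono {x y a : List Char} :
    ∀ (l : List (List Char)) (st : Bool × PySem.Set (List Char) × PySem.Set (List Char)),
    pvCont st x y → pvCont (l.foldl (fun st b => pvVisitA st a b) st) x y := by
  intro l
  induction l with
  | nil => intro st h; exact h
  | cons b t ih =>
    intro st h
    exact ih _ (pvCont_visitA_mono h a b)

lemma pvCont_after_fold {a : List Char} :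
    ∀ (l : List (List Char)) (st : Bool × PySem.Set (List Char) × PySem.Set (List Char)),
    ∀ b ∈ l, pvCont (l.foldl (fun st b => pvVisitA st a b) st) a b := by
  intro l
  induction l with
  | nil => intro st b hb; exact absurd hb (List.not_mem_nil)
  | cons c t ih =>
    intro st b hb
    simp only [List.foldl_cons]
    rcases List.mem_cons.mp hb with rfl | hb'
    · exact pvCont_fold_mono t _ (pvCont_visitA_self st a b)
    · exact ih _ b hb'

-- A's scan, triangle form
def pvTriA : (Bool × PySem.Set (List Char) × PySem.Set (List Char)) → List (List Char) →
    (Bool × PySem.Set (List Char) × PySem.Set (List Char))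
  | st, [] => st
  | st, a :: rest => pvTriA (rest.foldl (fun st b => pvVisitA st a b) st) rest

-- the full ordered-pair scan equals the triangle scan once processed pairs are contained
lemma pvSq_tri :
    ∀ (t d : List (List Char)) (st : Bool × PySem.Set (List Char) × PySem.Set (List Char)),
    (∀ a ∈ d, ∀ b ∈ d ++ t, pvCont st a b) →
    t.foldl (fun st a => (d ++ t).foldl (fun st b => pvVisitA st a b) st) st = pvTriA st t := by
  intro t
  induction t with
  | nil => intro d st _; rfl
  | cons a r ih =>
    intro d st hInv
    simp only [List.foldl_cons, pvTriA]
    have hd : (d ++ a :: r).foldl (fun st b => pvVisitA st a b) st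
        = r.foldl (fun st b => pvVisitA st a b) st := by
      rw [List.foldl_append]
      rw [pvFold_noop d st (fun b hb => pvCont_symm (hInv b hb a (by simp)))]
      simp only [List.foldl_cons]
      rw [pvVisitA_of_cont (pvCont_refl st a a rfl)]
    rw [hd]
    set st' := r.foldl (fun st b => pvVisitA st a b) st with hst'
    have hre : d ++ a :: r = (d ++ [a]) ++ r := by simp
    rw [hre]
    have hInv' : ∀ x ∈ d ++ [a], ∀ y ∈ (d ++ [a]) ++ r, pvCont st' x y := by
      intro x hx y hy
      rw [← hre] at hy
      rcases List.mem_append.mp hx with hxd | hxa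
      · exact pvCont_fold_mono r st (hInv x hxd y hy)
      · have hxa' : x = a := by simpa using hxa
        subst hxa'
        rcases List.mem_append.mp hy with hyd | hyar
        · exact pvCont_fold_mono r st (pvCont_symm (hInv y hyd x (by simp)))
        · rcases List.mem_cons.mp hyar with h' | hyr
          · exact pvCont_refl st' _ _ h'.symm
          · exact pvCont_after_fold r st y hyr
    exact ih (d ++ [a]) st' hInv' 

-- relate the two visit bodies and the two triangle scans
lemma pvVisit_proj (st : Bool × PySem.Set (List Char) × PySem.Set (List Char))
    (a b : List Char) : (pvVisitA st a b).2 = pvVisitB st.2 a b := by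
  unfold pvVisitA pvVisitB
  rw [pvMergeOne_eq]
  by_cases h : pvCd (a.zip b) = 1
  · rw [if_pos ((pvGuard_iff a b).mpr h), if_pos h]
  · rw [if_neg (fun hg => h ((pvGuard_iff a b).mp hg)), if_neg h]

lemma pvFold_proj (a : List Char) :
    ∀ (l : List (List Char)) (st : Bool × PySem.Set (List Char) × PySem.Set (List Char)),
    (l.foldl (fun st b => pvVisitA st a b) st).2 = l.foldl (fun s b => pvVisitB s a b) st.2 := by
  intro l
  induction l with
  | nil => intro st; rfl
  | cons b t ih =>
    intro st
    simp only [List.foldl_cons]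
    rw [ih, pvVisit_proj]

lemma pvTri_proj :
    ∀ (l : List (List Char)) (st : Bool × PySem.Set (List Char) × PySem.Set (List Char)),
    (pvTriA st l).2 = pvTriB st.2 l := by
  intro l
  induction l with
  | nil => intro st; rfl
  | cons a r ih =>
    intro st
    simp only [pvTriA, pvTriB]
    rw [ih, pvFold_proj]

-- flag/emptiness invariant
def pvWF (st : Bool × PySem.Set (List Char) × PySem.Set (List Char)) : Prop :=
  (st.1 = false ↔ st.2.1 = []) ∧ (st.2.1 = [] → st.2.2 = [])

lemma pvAdd_ne_nil {s : PySem.Set (List Char)} {x : List Char} : PySem.Set.add s x ≠ [] := by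
  rw [PySem.Set.add_eq_ite]
  split_ifs with h
  · intro hnil; subst hnil; exact absurd h (List.not_mem_nil)
  · simp

lemma pvWF_visitA {st : Bool × PySem.Set (List Char) × PySem.Set (List Char)}
    (h : pvWF st) (a b : List Char) : pvWF (pvVisitA st a b) := by
  unfold pvVisitA
  split_ifs with hg
  · exact ⟨by simp [pvAdd_ne_nil], fun hx => absurd hx pvAdd_ne_nil⟩
  · exact h

lemma pvWF_fold {a : List Char} :
    ∀ (l : List (List Char)) (st : Bool × PySem.Set (List Char) × PySem.Set (List Char)),
    pvWF st → pvWF (l.foldl (fun st b => pvVisitA st a b) st) := by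
  intro l
  induction l with
  | nil => intro st h; exact h
  | cons b t ih => intro st h; exact ih _ (pvWF_visitA h a b)

lemma pvWF_tri :
    ∀ (l : List (List Char)) (st : Bool × PySem.Set (List Char) × PySem.Set (List Char)),
    pvWF st → pvWF (pvTriA st l) := by
  intro l
  induction l with
  | nil => intro st h; exact h
  | cons a r ih => intro st h; exact ih _ (pvWF_fold r st h)

lemma pvStA_eq_tri (prev : List (List Char)) :
    pvStA prev = pvTriA (false, PySem.Set.empty, PySem.Set.empty) prev := by
  unfold pvStA
  have := pvSq_tri prev [] (false, PySem.Set.empty, PySem.Set.empty)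
    (by intro a ha; exact absurd ha (List.not_mem_nil))
  simpa using this

lemma pvLoop_eq : ∀ (f : Nat) (prev : List (List Char)), pvLoopA f prev = pvLoopB f prev := by
  intro f
  induction f with
  | zero => intro prev; rfl
  | succ f ih =>
    intro prev
    have hst : pvStA prev = pvTriA (false, PySem.Set.empty, PySem.Set.empty) prev :=
      pvStA_eq_tri prev
    have hproj : (pvStA prev).2 = pvTriB (PySem.Set.empty, PySem.Set.empty) prev := by
      rw [hst, pvTri_proj]
    have hwf : pvWF (pvStA prev) := by
      rw [hst]
      exact pvWF_tri prev _ ⟨by simp [PySem.Set.empty], by simp [PySem.Set.empty]⟩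
    simp only [pvLoopA, pvLoopB, pvRoundA]
    rw [← hproj]
    by_cases hM : (pvStA prev).2.1 = []
    · have hflag : (pvStA prev).1 = false := hwf.1.mpr hM
      have hP : (pvStA prev).2.2 = [] := hwf.2 hM
      simp [hflag, hM, hP, PySem.Set.ofList_eq_foldl]
    · have hflag : (pvStA prev).1 = true := by
        cases hb : (pvStA prev).1
        · exact absurd (hwf.1.mp hb) hM
        · rfl
      simp only [hflag, hM, if_true]
      exact ih _

-- ===== VERDICT (by name: the statement is the Claim_ definition above) =====
theorem simplify_prime_implicants_spec : Claim_equal_simplify_prime_implicants := by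
  intro l _
  unfold Spec_simplify_prime_implicants simplify_prime_implicants simplify_prime_implicants_alt
  rw [pvLoop_eq]
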